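-- pv_equiv track=rewrite | github.com/TAM-project01/linwpetsim-test | app.py | calculate_accumulated_facility_stats
-- ===== SOURCE A (Python) =====
-- all_stats_for_pure_calculation = ["Endurance", "Loyalty", "Speed", "HP", "Aggressiveness"] # Changed to English
--
-- facility_rewards_data = {
--     "Management Office": [ # Changed to English
--         {"Loyalty": 1}, {"Loyalty": 1}, {"Loyalty": 1}, {"Loyalty": 1}, {"Loyalty": 5},
--         {"Loyalty": 1}, {"Loyalty": 1}, {"Loyalty": 1}, {"Loyalty": 1}, {"Loyalty": 10},
--         {"Loyalty": 1}, {"Loyalty": 1}, {"Loyalty": 1}, {"Loyalty": 1}, {"Loyalty": 10},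
--         {"Loyalty": 2}, {"Loyalty": 2}, {"Aggressiveness": 1},
--         {"Pet EXP": "5%", "Loyalty": 5, "Aggressiveness": 1}, #19레벨
--         {"Pet EXP": "5%", "Loyalty": 5, "Aggressiveness": 5} #20레벨
--     ],
--     "Dormitory": [ # Changed to English
--         {"HP": 1}, {"HP": 1}, {"HP": 1}, {"HP": 1}, {"HP": 5},
--         {"HP": 1}, {"HP": 1}, {"HP": 1}, {"HP": 1}, {"HP": 10},
--         {"HP": 1}, {"HP": 1}, {"HP": 1}, {"HP": 1}, {"HP": 10},
--         {"Aggressiveness": 2}, {"Aggressiveness": 2}, {"Aggressiveness": 1},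
--         {"Pet EXP": "5%", "HP": 5, "Aggressiveness": 1}, #19레벨
--         {"Pet EXP": "5%", "HP": 5, "Aggressiveness": 5} #20레벨
--     ],
--     "Training Ground": [ # Changed to English
--         {"Speed": 1}, {"Speed": 1}, {"Speed": 1}, {"Speed": 1}, {"Speed": 5},
--         {"Speed": 1}, {"Speed": 1}, {"Speed": 1}, {"Speed": 1}, {"Speed": 10},
--         {"Speed": 1}, {"Speed": 1}, {"Speed": 1}, {"Speed": 1}, {"Speed": 10},
--         {"Speed": 2}, {"Speed": 2}, {"Aggressiveness": 1},
--         {"Pet EXP": "5%", "Speed": 5, "Aggressiveness": 1}, #19레벨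
--         {"Pet EXP": "5%", "Speed": 5, "Aggressiveness": 5} #20레벨
--     ],
--     "Playground": [ # Changed to English
--         {"HP": 1}, {"Loyalty": 1}, {"Endurance": 1}, {"Speed": 1}, {"Aggressiveness": 1},
--         {"Loyalty": 1}, {"Endurance": 1}, {"Speed": 1}, {"HP": 1}, {"Aggressiveness": 3},
--         {"Endurance": 1}, {"Speed": 1}, {"HP": 1}, {"Loyalty": 1}, {"Aggressiveness": 3},
--         {"Speed": 2}, {"HP": 2}, {"Loyalty": 2},
--         {"Pet EXP": "5%", "Endurance": 5, "Aggressiveness": 1}, #19레벨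
--         {"Pet EXP": "5%", "Aggressiveness": 5, "Speed": 5} #20레벨
--     ],
--     "Fence": [ # Changed to English
--         {"Endurance": 1}, {"Endurance": 1}, {"Endurance": 1}, {"Endurance": 1}, {"Endurance": 5},
--         {"Endurance": 1}, {"Endurance": 1}, {"Endurance": 1}, {"Endurance": 1}, {"Endurance": 10},
--         {"Endurance": 1}, {"Endurance": 1}, {"Endurance": 1}, {"Endurance": 1}, {"Endurance": 10},
--         {"Endurance": 2}, {"Endurance": 2}, {"Aggressiveness": 1},
--         {"Pet EXP": "5%", "Endurance": 5, "Aggressiveness": 1}, #19레벨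
--         {"Pet EXP": "5%", "Endurance": 5, "Aggressiveness": 5} #20레벨
--     ]
-- }
--
-- def calculate_accumulated_facility_stats(facility_name, level):
--     stats_to_sum = {stat: 0 for stat in all_stats_for_pure_calculation}
--     if facility_name in facility_rewards_data:
--         for i in range(min(level, len(facility_rewards_data[facility_name]))):
--             rewards_at_level = facility_rewards_data[facility_name][i]
--             for stat, value in rewards_at_level.items():
--                 if stat in stats_to_sum:
--                     stats_to_sum[stat] += value
--     return stats_to_sum
-- ===== SOURCE B (Python) =====
-- # B: the reward data is static, so the accumulated totals per level 0..20 are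
-- # baked in as a constant table of (Endurance, Loyalty, Speed, HP, Aggressiveness)
-- # tuples; a call clamps the level and zips one row with the stat names.
--
-- _STATS = ["Endurance", "Loyalty", "Speed", "HP", "Aggressiveness"]
--
-- _TABLE = {
--     "Management Office": [
--         (0, 0, 0, 0, 0), (0, 1, 0, 0, 0), (0, 2, 0, 0, 0), (0, 3, 0, 0, 0), (0, 4, 0, 0, 0), (0, 9, 0, 0, 0), (0, 10, 0, 0, 0),
--         (0, 11, 0, 0, 0), (0, 12, 0, 0, 0), (0, 13, 0, 0, 0), (0, 23, 0, 0, 0), (0, 24, 0, 0, 0), (0, 25, 0, 0, 0), (0, 26, 0, 0, 0),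
--         (0, 27, 0, 0, 0), (0, 37, 0, 0, 0), (0, 39, 0, 0, 0), (0, 41, 0, 0, 0), (0, 41, 0, 0, 1), (0, 46, 0, 0, 2), (0, 51, 0, 0, 7),
--     ],
--     "Dormitory": [
--         (0, 0, 0, 0, 0), (0, 0, 0, 1, 0), (0, 0, 0, 2, 0), (0, 0, 0, 3, 0), (0, 0, 0, 4, 0), (0, 0, 0, 9, 0), (0, 0, 0, 10, 0),
--         (0, 0, 0, 11, 0), (0, 0, 0, 12, 0), (0, 0, 0, 13, 0), (0, 0, 0, 23, 0), (0, 0, 0, 24, 0), (0, 0, 0, 25, 0), (0, 0, 0, 26, 0),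
--         (0, 0, 0, 27, 0), (0, 0, 0, 37, 0), (0, 0, 0, 37, 2), (0, 0, 0, 37, 4), (0, 0, 0, 37, 5), (0, 0, 0, 42, 6), (0, 0, 0, 47, 11),
--     ],
--     "Training Ground": [
--         (0, 0, 0, 0, 0), (0, 0, 1, 0, 0), (0, 0, 2, 0, 0), (0, 0, 3, 0, 0), (0, 0, 4, 0, 0), (0, 0, 9, 0, 0), (0, 0, 10, 0, 0),
--         (0, 0, 11, 0, 0), (0, 0, 12, 0, 0), (0, 0, 13, 0, 0), (0, 0, 23, 0, 0), (0, 0, 24, 0, 0), (0, 0, 25, 0, 0), (0, 0, 26, 0, 0),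
--         (0, 0, 27, 0, 0), (0, 0, 37, 0, 0), (0, 0, 39, 0, 0), (0, 0, 41, 0, 0), (0, 0, 41, 0, 1), (0, 0, 46, 0, 2), (0, 0, 51, 0, 7),
--     ],
--     "Playground": [
--         (0, 0, 0, 0, 0), (0, 0, 0, 1, 0), (0, 1, 0, 1, 0), (1, 1, 0, 1, 0), (1, 1, 1, 1, 0), (1, 1, 1, 1, 1), (1, 2, 1, 1, 1),
--         (2, 2, 1, 1, 1), (2, 2, 2, 1, 1), (2, 2, 2, 2, 1), (2, 2, 2, 2, 4), (3, 2, 2, 2, 4), (3, 2, 3, 2, 4), (3, 2, 3, 3, 4),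
--         (3, 3, 3, 3, 4), (3, 3, 3, 3, 7), (3, 3, 5, 3, 7), (3, 3, 5, 5, 7), (3, 5, 5, 5, 7), (8, 5, 5, 5, 8), (8, 5, 10, 5, 13),
--     ],
--     "Fence": [
--         (0, 0, 0, 0, 0), (1, 0, 0, 0, 0), (2, 0, 0, 0, 0), (3, 0, 0, 0, 0), (4, 0, 0, 0, 0), (9, 0, 0, 0, 0), (10, 0, 0, 0, 0),
--         (11, 0, 0, 0, 0), (12, 0, 0, 0, 0), (13, 0, 0, 0, 0), (23, 0, 0, 0, 0), (24, 0, 0, 0, 0), (25, 0, 0, 0, 0), (26, 0, 0, 0, 0),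
--         (27, 0, 0, 0, 0), (37, 0, 0, 0, 0), (39, 0, 0, 0, 0), (41, 0, 0, 0, 0), (41, 0, 0, 0, 1), (46, 0, 0, 0, 2), (51, 0, 0, 0, 7),
--     ],
-- }
--
--
-- def calculate_accumulated_facility_stats(facility_name, level):
--     rows = _TABLE.get(facility_name)
--     if rows is None:
--         return dict.fromkeys(_STATS, 0)
--     k = min(max(level, 0), 20)
--     return dict(zip(_STATS, rows[k]))
-- ===== Notes on version B (the rewrite author's own statement) =====
-- stated objective: alternative
-- what changed: Replaces A's per-call scan over the facility's reward-dict list with a baked-in constant table of accumulated (Endurance, Loyalty, Speed, HP, Aggressiveness) totals for levels 0..20 per facility; a call clamps the level and zips one table row with the stat names.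
import Mathlib
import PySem

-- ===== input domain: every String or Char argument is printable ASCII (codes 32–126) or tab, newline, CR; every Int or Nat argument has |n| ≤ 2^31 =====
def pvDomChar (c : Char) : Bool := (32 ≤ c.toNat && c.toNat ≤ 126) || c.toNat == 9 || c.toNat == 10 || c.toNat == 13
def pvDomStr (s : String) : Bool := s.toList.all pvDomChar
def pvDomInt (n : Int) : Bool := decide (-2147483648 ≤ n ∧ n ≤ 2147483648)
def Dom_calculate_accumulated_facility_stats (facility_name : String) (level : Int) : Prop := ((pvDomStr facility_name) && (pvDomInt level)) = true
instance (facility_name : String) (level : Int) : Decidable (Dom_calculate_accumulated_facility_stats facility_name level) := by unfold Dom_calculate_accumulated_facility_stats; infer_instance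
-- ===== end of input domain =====

-- B replaces A's per-call scan of the reward-dict list by a baked-in constant table of
-- accumulated stat totals per level 0..20 per facility (the reward data is static).

-- ===== PORT A =====
-- module constant all_stats_for_pure_calculation
def pvAllStats : List String := ["Endurance", "Loyalty", "Speed", "HP", "Aggressiveness"]

-- module constant facility_rewards_data; values are int or str ("5%"), modeled as Sum Int String
def pvFRD : PySem.Dict String (List (PySem.Dict String (Sum Int String))) :=
PySem.Dict.mk [
  ("Management Office", [
    PySem.Dict.mk [("Loyalty", Sum.inl 1)],
    PySem.Dict.mk [("Loyalty", Sum.inl 1)],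
    PySem.Dict.mk [("Loyalty", Sum.inl 1)],
    PySem.Dict.mk [("Loyalty", Sum.inl 1)],
    PySem.Dict.mk [("Loyalty", Sum.inl 5)],
    PySem.Dict.mk [("Loyalty", Sum.inl 1)],
    PySem.Dict.mk [("Loyalty", Sum.inl 1)],
    PySem.Dict.mk [("Loyalty", Sum.inl 1)],
    PySem.Dict.mk [("Loyalty", Sum.inl 1)],
    PySem.Dict.mk [("Loyalty", Sum.inl 10)],
    PySem.Dict.mk [("Loyalty", Sum.inl 1)],
    PySem.Dict.mk [("Loyalty", Sum.inl 1)],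
    PySem.Dict.mk [("Loyalty", Sum.inl 1)],
    PySem.Dict.mk [("Loyalty", Sum.inl 1)],
    PySem.Dict.mk [("Loyalty", Sum.inl 10)],
    PySem.Dict.mk [("Loyalty", Sum.inl 2)],
    PySem.Dict.mk [("Loyalty", Sum.inl 2)],
    PySem.Dict.mk [("Aggressiveness", Sum.inl 1)],
    PySem.Dict.mk [("Pet EXP", Sum.inr "5%"), ("Loyalty", Sum.inl 5), ("Aggressiveness", Sum.inl 1)],
    PySem.Dict.mk [("Pet EXP", Sum.inr "5%"), ("Loyalty", Sum.inl 5), ("Aggressiveness", Sum.inl 5)]]),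
  ("Dormitory", [
    PySem.Dict.mk [("HP", Sum.inl 1)],
    PySem.Dict.mk [("HP", Sum.inl 1)],
    PySem.Dict.mk [("HP", Sum.inl 1)],
    PySem.Dict.mk [("HP", Sum.inl 1)],
    PySem.Dict.mk [("HP", Sum.inl 5)],
    PySem.Dict.mk [("HP", Sum.inl 1)],
    PySem.Dict.mk [("HP", Sum.inl 1)],
    PySem.Dict.mk [("HP", Sum.inl 1)],
    PySem.Dict.mk [("HP", Sum.inl 1)],
    PySem.Dict.mk [("HP", Sum.inl 10)],
    PySem.Dict.mk [("HP", Sum.inl 1)],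
    PySem.Dict.mk [("HP", Sum.inl 1)],
    PySem.Dict.mk [("HP", Sum.inl 1)],
    PySem.Dict.mk [("HP", Sum.inl 1)],
    PySem.Dict.mk [("HP", Sum.inl 10)],
    PySem.Dict.mk [("Aggressiveness", Sum.inl 2)],
    PySem.Dict.mk [("Aggressiveness", Sum.inl 2)],
    PySem.Dict.mk [("Aggressiveness", Sum.inl 1)],
    PySem.Dict.mk [("Pet EXP", Sum.inr "5%"), ("HP", Sum.inl 5), ("Aggressiveness", Sum.inl 1)],
    PySem.Dict.mk [("Pet EXP", Sum.inr "5%"), ("HP", Sum.inl 5), ("Aggressiveness", Sum.inl 5)]]),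
  ("Training Ground", [
    PySem.Dict.mk [("Speed", Sum.inl 1)],
    PySem.Dict.mk [("Speed", Sum.inl 1)],
    PySem.Dict.mk [("Speed", Sum.inl 1)],
    PySem.Dict.mk [("Speed", Sum.inl 1)],
    PySem.Dict.mk [("Speed", Sum.inl 5)],
    PySem.Dict.mk [("Speed", Sum.inl 1)],
    PySem.Dict.mk [("Speed", Sum.inl 1)],
    PySem.Dict.mk [("Speed", Sum.inl 1)],
    PySem.Dict.mk [("Speed", Sum.inl 1)],
    PySem.Dict.mk [("Speed", Sum.inl 10)],
    PySem.Dict.mk [("Speed", Sum.inl 1)],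
    PySem.Dict.mk [("Speed", Sum.inl 1)],
    PySem.Dict.mk [("Speed", Sum.inl 1)],
    PySem.Dict.mk [("Speed", Sum.inl 1)],
    PySem.Dict.mk [("Speed", Sum.inl 10)],
    PySem.Dict.mk [("Speed", Sum.inl 2)],
    PySem.Dict.mk [("Speed", Sum.inl 2)],
    PySem.Dict.mk [("Aggressiveness", Sum.inl 1)],
    PySem.Dict.mk [("Pet EXP", Sum.inr "5%"), ("Speed", Sum.inl 5), ("Aggressiveness", Sum.inl 1)],
    PySem.Dict.mk [("Pet EXP", Sum.inr "5%"), ("Speed", Sum.inl 5), ("Aggressiveness", Sum.inl 5)]]),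
  ("Playground", [
    PySem.Dict.mk [("HP", Sum.inl 1)],
    PySem.Dict.mk [("Loyalty", Sum.inl 1)],
    PySem.Dict.mk [("Endurance", Sum.inl 1)],
    PySem.Dict.mk [("Speed", Sum.inl 1)],
    PySem.Dict.mk [("Aggressiveness", Sum.inl 1)],
    PySem.Dict.mk [("Loyalty", Sum.inl 1)],
    PySem.Dict.mk [("Endurance", Sum.inl 1)],
    PySem.Dict.mk [("Speed", Sum.inl 1)],
    PySem.Dict.mk [("HP", Sum.inl 1)],
    PySem.Dict.mk [("Aggressiveness", Sum.inl 3)],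
    PySem.Dict.mk [("Endurance", Sum.inl 1)],
    PySem.Dict.mk [("Speed", Sum.inl 1)],
    PySem.Dict.mk [("HP", Sum.inl 1)],
    PySem.Dict.mk [("Loyalty", Sum.inl 1)],
    PySem.Dict.mk [("Aggressiveness", Sum.inl 3)],
    PySem.Dict.mk [("Speed", Sum.inl 2)],
    PySem.Dict.mk [("HP", Sum.inl 2)],
    PySem.Dict.mk [("Loyalty", Sum.inl 2)],
    PySem.Dict.mk [("Pet EXP", Sum.inr "5%"), ("Endurance", Sum.inl 5), ("Aggressiveness", Sum.inl 1)],
    PySem.Dict.mk [("Pet EXP", Sum.inr "5%"), ("Aggressiveness", Sum.inl 5), ("Speed", Sum.inl 5)]]),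
  ("Fence", [
    PySem.Dict.mk [("Endurance", Sum.inl 1)],
    PySem.Dict.mk [("Endurance", Sum.inl 1)],
    PySem.Dict.mk [("Endurance", Sum.inl 1)],
    PySem.Dict.mk [("Endurance", Sum.inl 1)],
    PySem.Dict.mk [("Endurance", Sum.inl 5)],
    PySem.Dict.mk [("Endurance", Sum.inl 1)],
    PySem.Dict.mk [("Endurance", Sum.inl 1)],
    PySem.Dict.mk [("Endurance", Sum.inl 1)],
    PySem.Dict.mk [("Endurance", Sum.inl 1)],
    PySem.Dict.mk [("Endurance", Sum.inl 10)],
    PySem.Dict.mk [("Endurance", Sum.inl 1)],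
    PySem.Dict.mk [("Endurance", Sum.inl 1)],
    PySem.Dict.mk [("Endurance", Sum.inl 1)],
    PySem.Dict.mk [("Endurance", Sum.inl 1)],
    PySem.Dict.mk [("Endurance", Sum.inl 10)],
    PySem.Dict.mk [("Endurance", Sum.inl 2)],
    PySem.Dict.mk [("Endurance", Sum.inl 2)],
    PySem.Dict.mk [("Aggressiveness", Sum.inl 1)],
    PySem.Dict.mk [("Pet EXP", Sum.inr "5%"), ("Endurance", Sum.inl 5), ("Aggressiveness", Sum.inl 1)],
    PySem.Dict.mk [("Pet EXP", Sum.inr "5%"), ("Endurance", Sum.inl 5), ("Aggressiveness", Sum.inl 5)]])]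

-- reward value as the int Python adds; the .inr (string) case is unreachable in the add
-- because string-valued rewards ("Pet EXP") are never keys of stats_to_sum
def pvVal : Sum Int String → Int
  | Sum.inl n => n
  | Sum.inr _ => 0

def calculate_accumulated_facility_stats (facility_name : String) (level : Int) : List (String × Int) :=
  let stats0 : PySem.Dict String Int := pvAllStats.foldl (fun d s => d.insert s 0) (PySem.Dict.mk [])
  let stats :=
    if (pvFRD.get? facility_name).isSome then
      let rewards := (pvFRD.get? facility_name).getD []
      (PySem.List.pyRange 0 (min level (rewards.length : Int)) 1).foldl
        (fun d i =>
          -- rewards[i]: i drawn from range(len(rewards)), always in bounds, so the default is never used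
          let rewards_at_level := (PySem.List.pyGet? rewards i).getD (PySem.Dict.mk [])
          rewards_at_level.items.foldl
            (fun d p =>
              if d.contains p.1 then d.insert p.1 (d.getD p.1 0 + pvVal p.2) else d)
            d)
        stats0
    else stats0
  stats.items

-- ===== PORT B =====
-- _TABLE from Source B: per facility, accumulated (Endurance, Loyalty, Speed, HP, Aggressiveness)
-- totals at each level 0..20. Keys of the literal dict are distinct, so _TABLE.get is
-- exactly first-match lookup over the association list (List.lookup): exact.
def pvTable : List (String × List (Int × Int × Int × Int × Int)) := [
  ("Management Office",
    [(0, 0, 0, 0, 0), (0, 1, 0, 0, 0), (0, 2, 0, 0, 0),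
     (0, 3, 0, 0, 0), (0, 4, 0, 0, 0), (0, 9, 0, 0, 0),
     (0, 10, 0, 0, 0), (0, 11, 0, 0, 0), (0, 12, 0, 0, 0),
     (0, 13, 0, 0, 0), (0, 23, 0, 0, 0), (0, 24, 0, 0, 0),
     (0, 25, 0, 0, 0), (0, 26, 0, 0, 0), (0, 27, 0, 0, 0),
     (0, 37, 0, 0, 0), (0, 39, 0, 0, 0), (0, 41, 0, 0, 0),
     (0, 41, 0, 0, 1), (0, 46, 0, 0, 2), (0, 51, 0, 0, 7)]),
  ("Dormitory",
    [(0, 0, 0, 0, 0), (0, 0, 0, 1, 0), (0, 0, 0, 2, 0),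
     (0, 0, 0, 3, 0), (0, 0, 0, 4, 0), (0, 0, 0, 9, 0),
     (0, 0, 0, 10, 0), (0, 0, 0, 11, 0), (0, 0, 0, 12, 0),
     (0, 0, 0, 13, 0), (0, 0, 0, 23, 0), (0, 0, 0, 24, 0),
     (0, 0, 0, 25, 0), (0, 0, 0, 26, 0), (0, 0, 0, 27, 0),
     (0, 0, 0, 37, 0), (0, 0, 0, 37, 2), (0, 0, 0, 37, 4),
     (0, 0, 0, 37, 5), (0, 0, 0, 42, 6), (0, 0, 0, 47, 11)]),
  ("Training Ground",
    [(0, 0, 0, 0, 0), (0, 0, 1, 0, 0), (0, 0, 2, 0, 0),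
     (0, 0, 3, 0, 0), (0, 0, 4, 0, 0), (0, 0, 9, 0, 0),
     (0, 0, 10, 0, 0), (0, 0, 11, 0, 0), (0, 0, 12, 0, 0),
     (0, 0, 13, 0, 0), (0, 0, 23, 0, 0), (0, 0, 24, 0, 0),
     (0, 0, 25, 0, 0), (0, 0, 26, 0, 0), (0, 0, 27, 0, 0),
     (0, 0, 37, 0, 0), (0, 0, 39, 0, 0), (0, 0, 41, 0, 0),
     (0, 0, 41, 0, 1), (0, 0, 46, 0, 2), (0, 0, 51, 0, 7)]),
  ("Playground",
    [(0, 0, 0, 0, 0), (0, 0, 0, 1, 0), (0, 1, 0, 1, 0),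
     (1, 1, 0, 1, 0), (1, 1, 1, 1, 0), (1, 1, 1, 1, 1),
     (1, 2, 1, 1, 1), (2, 2, 1, 1, 1), (2, 2, 2, 1, 1),
     (2, 2, 2, 2, 1), (2, 2, 2, 2, 4), (3, 2, 2, 2, 4),
     (3, 2, 3, 2, 4), (3, 2, 3, 3, 4), (3, 3, 3, 3, 4),
     (3, 3, 3, 3, 7), (3, 3, 5, 3, 7), (3, 3, 5, 5, 7),
     (3, 5, 5, 5, 7), (8, 5, 5, 5, 8), (8, 5, 10, 5, 13)]),
  ("Fence",
    [(0, 0, 0, 0, 0), (1, 0, 0, 0, 0), (2, 0, 0, 0, 0),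
     (3, 0, 0, 0, 0), (4, 0, 0, 0, 0), (9, 0, 0, 0, 0),
     (10, 0, 0, 0, 0), (11, 0, 0, 0, 0), (12, 0, 0, 0, 0),
     (13, 0, 0, 0, 0), (23, 0, 0, 0, 0), (24, 0, 0, 0, 0),
     (25, 0, 0, 0, 0), (26, 0, 0, 0, 0), (27, 0, 0, 0, 0),
     (37, 0, 0, 0, 0), (39, 0, 0, 0, 0), (41, 0, 0, 0, 0),
     (41, 0, 0, 0, 1), (46, 0, 0, 0, 2), (51, 0, 0, 0, 7)])]

def calculate_accumulated_facility_stats_alt (facility_name : String) (level : Int) : List (String × Int) :=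
  match pvTable.lookup facility_name with
  | none =>
    -- dict.fromkeys(_STATS, 0)
    [("Endurance", 0), ("Loyalty", 0), ("Speed", 0), ("HP", 0), ("Aggressiveness", 0)]
  | some rows =>
    let k := min (max level 0) 20
    -- rows[k]: k is clamped into 0..20 and rows has 21 entries, so the default is never used
    let r := (PySem.List.pyGet? rows k).getD (0, 0, 0, 0, 0)
    -- dict(zip(_STATS, rows[k]))
    [("Endurance", r.1), ("Loyalty", r.2.1), ("Speed", r.2.2.1), ("HP", r.2.2.2.1), ("Aggressiveness", r.2.2.2.2)]

-- ===== PRECONDITION & SPEC =====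
def Spec_calculate_accumulated_facility_stats (facility_name : String) (level : Int) (out : List (String × Int)) : Prop := out = calculate_accumulated_facility_stats_alt facility_name level
instance (facility_name : String) (level : Int) (out : List (String × Int)) : Decidable (Spec_calculate_accumulated_facility_stats facility_name level out) := by unfold Spec_calculate_accumulated_facility_stats; infer_instance

-- ===== CLAIM =====
def Claim_equal_calculate_accumulated_facility_stats : Prop := ∀ (facility_name : String) (level : Int), Dom_calculate_accumulated_facility_stats facility_name level → Spec_calculate_accumulated_facility_stats facility_name level (calculate_accumulated_facility_stats facility_name level)

-- ===== LEMMAS AND PROOFS =====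

lemma pvFRD_len (fn : String) (rs : List (PySem.Dict String (Sum Int String)))
    (h : pvFRD.get? fn = some rs) : rs.length = 20 := by
  have hm := PySem.Dict.mem_items_of_get?_eq_some pvFRD h
  have hall : ∀ p ∈ pvFRD.items, p.2.length = 20 := by decide
  exact hall _ hm

-- A only reads level through range(min(level, 20)), so clamping the level does not change A
lemma A_clamp (fn : String) (l1 l2 : Int) (h : max 0 (min l1 20) = max 0 (min l2 20)) :
    calculate_accumulated_facility_stats fn l1 = calculate_accumulated_facility_stats fn l2 := by
  unfold calculate_accumulated_facility_stats
  cases hrs : pvFRD.get? fn with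
  | none => simp
  | some rs =>
    have hl := pvFRD_len fn rs hrs
    simp only [Option.isSome_some, if_true, Option.getD_some, hl]
    rw [PySem.List.pyRange_one, PySem.List.pyRange_one]
    have : (min l1 ((20 : Nat) : Int) - 0).toNat = (min l2 ((20 : Nat) : Int) - 0).toNat := by
      push_cast
      omega
    rw [this]

-- B only reads level through the clamp min(max(level,0),20)
lemma B_clamp (fn : String) (l1 l2 : Int) (h : max 0 (min l1 20) = max 0 (min l2 20)) :
    calculate_accumulated_facility_stats_alt fn l1 = calculate_accumulated_facility_stats_alt fn l2 := by
  unfold calculate_accumulated_facility_stats_alt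
  have : min (max l1 0) 20 = min (max l2 0) 20 := by omega
  rw [this]

lemma AB_small : ∀ i : Fin 21, ∀ fn ∈ ["Management Office", "Dormitory", "Training Ground", "Playground", "Fence"],
    calculate_accumulated_facility_stats fn (i.val : Int) = calculate_accumulated_facility_stats_alt fn (i.val : Int) := by
  decide

lemma pvFRD_keys : pvFRD.keys = ["Management Office", "Dormitory", "Training Ground", "Playground", "Fence"] := by decide

lemma pvTable_lookup_none (fn : String)
    (h : fn ∉ ["Management Office", "Dormitory", "Training Ground", "Playground", "Fence"]) :
    pvTable.lookup fn = none := by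
  simp only [List.mem_cons, List.not_mem_nil, or_false, not_or] at h
  obtain ⟨h1, h2, h3, h4, h5⟩ := h
  simp [pvTable, List.lookup, (beq_eq_false_iff_ne (a := fn)).mpr h1,
    (beq_eq_false_iff_ne (a := fn)).mpr h2, (beq_eq_false_iff_ne (a := fn)).mpr h3,
    (beq_eq_false_iff_ne (a := fn)).mpr h4, (beq_eq_false_iff_ne (a := fn)).mpr h5]

-- ===== VERDICT =====
theorem calculate_accumulated_facility_stats_spec : Claim_equal_calculate_accumulated_facility_stats := by
  intro fn level _
  unfold Spec_calculate_accumulated_facility_stats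
  by_cases hmem : fn ∈ ["Management Office", "Dormitory", "Training Ground", "Playground", "Fence"]
  · -- a known facility: clamp the level into 0..20 and check the 21 cases
    have hlt : (max 0 (min level 20)).toNat < 21 := by omega
    have h1 : max 0 (min level 20) = max 0 (min ((max 0 (min level 20)).toNat : Int) 20) := by omega
    rw [A_clamp fn level _ h1, B_clamp fn level _ h1]
    exact AB_small ⟨(max 0 (min level 20)).toNat, hlt⟩ fn hmem
  · -- unknown facility: both lookups miss and both return the all-zero stats dict
    have hA : pvFRD.get? fn = none := by
      rw [PySem.Dict.get?_eq_none_iff_not_mem_keys, pvFRD_keys]; exact hmem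
    have hB : pvTable.lookup fn = none := pvTable_lookup_none fn hmem
    unfold calculate_accumulated_facility_stats calculate_accumulated_facility_stats_alt
    simp [hA, hB]
    decide
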